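-- pv_equiv track=rewrite | github.com/jacobkino1/dba | backend/permissions.py | get_accessible_document_levels
-- ===== SOURCE A (Python) =====
-- from typing import Iterable, Optional
--
-- PERMISSION_RANK = {
--     "read": 1,
--     "write": 2,
--     "manage": 3,
--     "admin": 4,
-- }
--
-- def normalize_permission_level(value: Optional[str]) -> Optional[str]:
--     if value is None:
--         return None
--
--     normalized = str(value).strip().lower()
--     if normalized not in PERMISSION_RANK:
--         return None
--
--     return normalized
--
-- def get_accessible_document_levels(user_level: Optional[str]) -> list[str]:
--     normalized_user = normalize_permission_level(user_level)
--     if not normalized_user: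
--         return []
--
--     return [
--         level
--         for level, rank in PERMISSION_RANK.items()
--         if rank <= PERMISSION_RANK[normalized_user]
--     ]
-- ===== SOURCE B (Python) =====
-- from typing import Optional
--
-- PERMISSION_RANK = {
--     "read": 1,
--     "write": 2,
--     "manage": 3,
--     "admin": 4,
-- }
--
-- _LEVELS = ["read", "write", "manage", "admin"]  # levels in rank order
--
-- def get_accessible_document_levels(user_level: Optional[str]) -> list[str]:
--     if user_level is None:
--         return []
--     rank = PERMISSION_RANK.get(str(user_level).strip().lower())
--     if rank is None:
--         return []
--     return _LEVELS[:rank]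
-- ===== Notes on version B (the rewrite author's own statement) =====
-- stated objective: simpler
-- what changed: B replaces the per-element rank<= filtering comprehension over the dict items (plus the separate normalize helper) with a single dict lookup followed by a prefix slice of the precomputed rank-ordered level list.
import Mathlib
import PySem

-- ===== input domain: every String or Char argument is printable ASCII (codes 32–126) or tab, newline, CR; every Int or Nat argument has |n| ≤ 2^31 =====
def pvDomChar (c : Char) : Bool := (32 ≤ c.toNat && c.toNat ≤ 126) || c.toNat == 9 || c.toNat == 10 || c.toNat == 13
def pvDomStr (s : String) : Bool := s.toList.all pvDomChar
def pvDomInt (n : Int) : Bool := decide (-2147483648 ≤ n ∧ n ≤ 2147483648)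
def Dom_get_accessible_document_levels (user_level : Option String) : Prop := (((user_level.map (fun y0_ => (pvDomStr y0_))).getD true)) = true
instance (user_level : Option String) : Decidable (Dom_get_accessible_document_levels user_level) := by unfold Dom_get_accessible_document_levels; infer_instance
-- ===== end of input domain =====

-- B replaces A's per-item filtering comprehension over the dict with one lookup + a prefix slice of the rank-ordered level list (objective: simpler).

-- ===== PORT A =====
def pvRankA : PySem.Dict String Int :=
  PySem.Dict.ofList [("read", 1), ("write", 2), ("manage", 3), ("admin", 4)]

def normalize_permission_level (value : Option String) : Option String :=
  match value with
  | none => none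
  | some v =>
    -- str(value) on a str is the string itself
    let normalized := PySem.Str.lower (PySem.Str.strip v)
    if pvRankA.contains normalized then some normalized else none

def get_accessible_document_levels (user_level : Option String) : List String :=
  match normalize_permission_level user_level with
  | none => []
  | some normalized_user =>
    if normalized_user = "" then []   -- Python truthiness: `not normalized_user`
    else
      -- PERMISSION_RANK[normalized_user]: the key is present here, so KeyError is unreachable; getD's default is never used
      pvRankA.items.foldl
        (fun acc p => if p.2 ≤ (pvRankA.get? normalized_user).getD 0 then acc ++ [p.1] else acc) []

-- ===== PORT B =====
def pvRankB : PySem.Dict String Int :=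
  PySem.Dict.ofList [("read", 1), ("write", 2), ("manage", 3), ("admin", 4)]

def pvLevels : List String := ["read", "write", "manage", "admin"]

def get_accessible_document_levels_alt (user_level : Option String) : List String :=
  match user_level with
  | none => []
  | some v =>
    match pvRankB.get? (PySem.Str.lower (PySem.Str.strip v)) with
    | none => []
    | some r => pvLevels.take r.toNat   -- _LEVELS[:rank]; rank ∈ {1,2,3,4} here so the slice is List.take

-- ===== PRECONDITION & SPEC =====
def Spec_get_accessible_document_levels (user_level : Option String) (out : List String) : Prop := out = get_accessible_document_levels_alt user_level
instance (user_level : Option String) (out : List String) : Decidable (Spec_get_accessible_document_levels user_level out) := by unfold Spec_get_accessible_document_levels; infer_instance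

-- ===== CLAIM (what is proved, stated in full; the proofs are below) =====
def Claim_equal_get_accessible_document_levels : Prop := ∀ (user_level : Option String), Dom_get_accessible_document_levels user_level → Spec_get_accessible_document_levels user_level (get_accessible_document_levels user_level)

-- ===== LEMMAS AND PROOFS =====

-- Both ports depend on the string only through t = lower(strip v); case on which key t equals.
lemma some_eq (v : String) :
    get_accessible_document_levels (some v) = get_accessible_document_levels_alt (some v) := by
  simp only [get_accessible_document_levels, get_accessible_document_levels_alt,
    normalize_permission_level]
  generalize PySem.Str.lower (PySem.Str.strip v) = t
  have hA : pvRankA = PySem.Dict.mk [("read",1),("write",2),("manage",3),("admin",4)] := by decide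
  have hB : pvRankB = PySem.Dict.mk [("read",1),("write",2),("manage",3),("admin",4)] := by decide
  by_cases h1 : t = "read"; · subst h1; decide
  by_cases h2 : t = "write"; · subst h2; decide
  by_cases h3 : t = "manage"; · subst h3; decide
  by_cases h4 : t = "admin"; · subst h4; decide
  have hc : pvRankA.contains t = false := by
    simp [hA, PySem.Dict.contains_mk, Ne.symm h1, Ne.symm h2, Ne.symm h3, Ne.symm h4]
  have hg : pvRankB.get? t = none := by
    simp [hB, Ne.symm h1, Ne.symm h2, Ne.symm h3, Ne.symm h4, PySem.Dict.get?]
  simp [hc, hg]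

-- ===== VERDICT (by name: the statement is the Claim_ definition above) =====
theorem get_accessible_document_levels_spec : Claim_equal_get_accessible_document_levels := by
  intro u _
  unfold Spec_get_accessible_document_levels
  cases u with
  | none => rfl
  | some v => exact some_eq v
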